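-- pv_equiv track=rewrite | github.com/nadiabahrami/c_war_practice | level_5/dont_drink_the_water.py | separate_liquids
-- ===== SOURCE A (Python) =====
-- def separate_liquids(glass):
--     if not glass:
--         return []
--     dict = {"O":0, "A":0, "W":0, "H":0}
--     row = len(glass[0])
--     col = len(glass)
--     for l in glass:
--         for m in l:
--             dict[m] += 1
--     r = []
--     result = []
--     for i in range(row*col):
--         if dict["O"] != 0:
--             r.append("O")
--             dict["O"] -= 1
--         elif dict["A"] != 0:
--             r.append("A")
--             dict["A"] -= 1
--         elif dict["W"] != 0:
--             r.append("W")
--             dict["W"] -= 1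
--         else:
--             r.append("H")
--             dict["H"] -= 1
--         if len(r) == row:
--             result.append(r)
--             r = []
--     return result
-- ===== SOURCE B (Python) =====
-- def separate_liquids(glass):
--     if not glass:
--         return []
--     counts = {"O": 0, "A": 0, "W": 0, "H": 0}
--     for l in glass:
--         for m in l:
--             counts[m] += 1
--     row = len(glass[0])
--     if row == 0:
--         return []
--     seq = ["O"] * counts["O"] + ["A"] * counts["A"] + ["W"] * counts["W"] + ["H"] * counts["H"]
--     result = []
--     while len(seq) >= row:
--         result.append(seq[:row])
--         seq = seq[row:]
--     return result
-- ===== Notes on version B (the rewrite author's own statement) =====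
-- stated objective: simpler
-- what changed: Instead of simulating the pour cell-by-cell with a 4-way branch chain over mutable counters, B builds the density-ordered sequence directly by list replication and concatenation and then chunks it into rows by slicing.
-- outside the precondition, e.g. on separate_liquids([['O'], ['W', 'A']]): A returns [['O'], ['A']], B returns [['O'], ['A'], ['W']]
import Mathlib
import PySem

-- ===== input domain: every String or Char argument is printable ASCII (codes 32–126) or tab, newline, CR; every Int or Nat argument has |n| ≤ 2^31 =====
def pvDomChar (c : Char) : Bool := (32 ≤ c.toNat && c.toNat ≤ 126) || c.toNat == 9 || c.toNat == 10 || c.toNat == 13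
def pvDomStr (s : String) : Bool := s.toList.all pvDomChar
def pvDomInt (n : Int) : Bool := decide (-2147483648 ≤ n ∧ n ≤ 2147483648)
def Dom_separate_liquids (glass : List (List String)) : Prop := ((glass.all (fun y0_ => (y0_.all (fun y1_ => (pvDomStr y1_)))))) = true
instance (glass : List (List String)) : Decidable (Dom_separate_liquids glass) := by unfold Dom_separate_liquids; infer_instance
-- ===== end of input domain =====

-- B builds the density-ordered sequence directly by replication and chunks it into rows by
-- slicing, instead of A's cell-by-cell pour simulation over mutable counters (objective: simpler).

-- ===== PORT A =====
-- body of A's 'for i in range(row*col)' loop; state = (dict, r, result)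
def sepLoopBody (row : Int) (s : PySem.Dict String Int × List String × List (List String)) :
    PySem.Dict String Int × List String × List (List String) :=
  let dr : PySem.Dict String Int × List String :=
    if s.1.getD "O" 0 ≠ 0 then (PySem.Dict.modify s.1 "O" 0 (· - 1), s.2.1 ++ ["O"])
    else if s.1.getD "A" 0 ≠ 0 then (PySem.Dict.modify s.1 "A" 0 (· - 1), s.2.1 ++ ["A"])
    else if s.1.getD "W" 0 ≠ 0 then (PySem.Dict.modify s.1 "W" 0 (· - 1), s.2.1 ++ ["W"])
    else (PySem.Dict.modify s.1 "H" 0 (· - 1), s.2.1 ++ ["H"])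
  if ((dr.2.length : Int) = row) then (dr.1, ([] : List String), s.2.2 ++ [dr.2])
  else (dr.1, dr.2, s.2.2)

-- literal port of A; 'dict[m] += 1' / 'dict[k] -= 1' are Dict.modify, exact whenever the key is
-- present (inside Pre_ every m is one of the four keys; on other keys Python raises KeyError).
def separate_liquids (glass : List (List String)) : List (List String) :=
  if glass = [] then []
  else
    let d0 : PySem.Dict String Int := PySem.Dict.ofList [("O",0),("A",0),("W",0),("H",0)]
    let row : Int := ((glass.headD []).length : Int)   -- glass[0]; exact: glass ≠ [] here
    let col : Int := (glass.length : Int)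
    let d := glass.foldl (fun d l => l.foldl (fun d m => PySem.Dict.modify d m 0 (· + 1)) d) d0
    let fin := (PySem.List.pyRange 0 (row*col) 1).foldl (fun s _ => sepLoopBody row s)
      (d, ([] : List String), ([] : List (List String)))
    fin.2.2

-- ===== PORT B =====
-- the 'while len(seq) >= row: result.append(seq[:row]); seq = seq[row:]' loop of Source B
-- (the '0 < row' conjunct only makes the recursion total; Source B reaches the loop with row ≥ 1)
def chunkRows (row : Int) (seq : List String) (acc : List (List String)) : List (List String) :=
  if h : 0 < row ∧ row ≤ (seq.length : Int) then
    chunkRows row (PySem.List.slice seq (some row) none) (acc ++ [PySem.List.slice seq none (some row)])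
  else acc
termination_by seq.length
decreasing_by
  simp only [PySem.List.slice_from seq (le_of_lt h.1), List.length_drop]
  omega

def separate_liquids_alt (glass : List (List String)) : List (List String) :=
  if glass = [] then []
  else
    let counts := glass.foldl (fun d l => l.foldl (fun d m => PySem.Dict.modify d m 0 (· + 1)) d)
      (PySem.Dict.ofList [("O",0),("A",0),("W",0),("H",0)])
    let row : Int := ((glass.headD []).length : Int)
    if row = 0 then []
    else
      let seq := PySem.List.pyRepeat ["O"] (counts.getD "O" 0) ++ PySem.List.pyRepeat ["A"] (counts.getD "A" 0)
        ++ PySem.List.pyRepeat ["W"] (counts.getD "W" 0) ++ PySem.List.pyRepeat ["H"] (counts.getD "H" 0)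
      chunkRows row seq []

-- ===== PRECONDITION & SPEC =====
-- Pre_ excludes (1) glasses containing a string other than "O"/"A"/"W"/"H", on which A raises
-- KeyError, and (2) ragged glasses (rows of unequal length) — malformed input for a grid
-- function, on which A's fixed row*col cell count silently drops or pads liquids.
def Pre_separate_liquids (glass : List (List String)) : Prop :=
  (∀ l ∈ glass, ∀ m ∈ l, m = "O" ∨ m = "A" ∨ m = "W" ∨ m = "H") ∧
  (∀ l ∈ glass, l.length = (glass.headD []).length)
instance (glass : List (List String)) : Decidable (Pre_separate_liquids glass) := by
  unfold Pre_separate_liquids; infer_instance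

def pvWitness_separate_liquids : List (List String) := [["O", "W"], ["A", "H"]]

def Spec_separate_liquids (glass : List (List String)) (out : List (List String)) : Prop := out = separate_liquids_alt glass
instance (glass : List (List String)) (out : List (List String)) : Decidable (Spec_separate_liquids glass out) := by unfold Spec_separate_liquids; infer_instance

-- ===== CLAIM (what is proved, stated in full; the proofs are below) =====
def Claim_equal_separate_liquids : Prop := ∀ (glass : List (List String)), Dom_separate_liquids glass → Pre_separate_liquids glass → Spec_separate_liquids glass (separate_liquids glass)

-- ===== LEMMAS AND PROOFS =====

theorem foldl_ignore_index {σ α : Type} (f : σ → σ) (s : σ) (l : List α) :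
    l.foldl (fun s _ => f s) s = f^[l.length] s := by
  induction l generalizing s with
  | nil => rfl
  | cons x t ih => simpa [Function.iterate_succ_apply] using ih (f s)

theorem chunk_acc_aux (row : Int) : ∀ (n : Nat) (seq : List String) (acc : List (List String)),
    seq.length = n → chunkRows row seq acc = acc ++ chunkRows row seq [] := by
  intro n
  induction n using Nat.strong_induction_on with
  | _ n ih =>
    intro seq acc hlen
    rw [chunkRows]; conv_rhs => rw [chunkRows]
    by_cases h : 0 < row ∧ row ≤ (seq.length : Int)
    · rw [dif_pos h, dif_pos h]
      have hlt : (PySem.List.slice seq (some row)).length < n := by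
        simp only [PySem.List.slice_from seq (le_of_lt h.1), List.length_drop]; omega
      rw [ih _ hlt _ _ rfl, ih _ hlt _ ([] ++ [PySem.List.slice seq none (some row)]) rfl]
      simp
    · rw [dif_neg h, dif_neg h]; simp

theorem chunk_acc (row : Int) (seq : List String) (acc : List (List String)) :
    chunkRows row seq acc = acc ++ chunkRows row seq [] :=
  chunk_acc_aux row seq.length seq acc rfl

theorem chunk_nil_short (row : Int) (r : List String) (hr : (r.length : Int) < row) :
    chunkRows row r [] = [] := by
  rw [chunkRows, dif_neg (by omega)]

theorem chunk_full (row : Int) (c rest : List String) (hc : (c.length : Int) = row)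
    (hpos : 0 < row) : chunkRows row (c ++ rest) [] = c :: chunkRows row rest [] := by
  have htn : row.toNat = c.length := by omega
  rw [chunkRows, dif_pos ⟨hpos, by simp; omega⟩]
  rw [PySem.List.slice_to _ (le_of_lt hpos), PySem.List.slice_from _ (le_of_lt hpos)]
  rw [htn, List.take_left, List.drop_left, chunk_acc]
  simp

theorem count_partition (l : List String)
    (hl : ∀ m ∈ l, m = "O" ∨ m = "A" ∨ m = "W" ∨ m = "H") :
    l.count "O" + l.count "A" + l.count "W" + l.count "H" = l.length := by
  induction l with
  | nil => rfl
  | cons x t ih =>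
    have hx := hl x (by simp)
    have ht := ih (fun m hm => hl m (by simp [hm]))
    rcases hx with h|h|h|h <;> subst h <;> simp <;> omega

theorem flatten_len (glass : List (List String)) (r0 : Nat) (h : ∀ l ∈ glass, l.length = r0) :
    glass.flatten.length = glass.length * r0 := by
  induction glass with
  | nil => simp
  | cons x t ih =>
    have hx := h x (by simp)
    have ht := ih (fun l hl => h l (by simp [hl]))
    simp [hx, ht, Nat.succ_mul, Nat.add_comm]

-- one step of A's loop, followed by n more, consumes the head of the remaining sequence
theorem step_chunk (row : Int) (n : Nat)
    (ih : ∀ (d : PySem.Dict String Int) (a b w h : Int) (r : List String) (res : List (List String)),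
      d.getD "O" 0 = a → d.getD "A" 0 = b → d.getD "W" 0 = w → d.getD "H" 0 = h →
      0 ≤ a → 0 ≤ b → 0 ≤ w → 0 ≤ h → a + b + w + h = n → (r.length : Int) < row →
      ((sepLoopBody row)^[n] (d, r, res)).2.2
        = res ++ chunkRows row (r ++ List.replicate a.toNat "O" ++ List.replicate b.toNat "A"
            ++ List.replicate w.toNat "W" ++ List.replicate h.toNat "H") [])
    (d' : PySem.Dict String Int) (a b w h : Int)
    (hO : d'.getD "O" 0 = a) (hA : d'.getD "A" 0 = b) (hW : d'.getD "W" 0 = w) (hH : d'.getD "H" 0 = h)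
    (ha : 0 ≤ a) (hb : 0 ≤ b) (hw : 0 ≤ w) (hh : 0 ≤ h) (hsum : a + b + w + h = n)
    (r : List String) (res : List (List String)) (x : String) (hr : (r.length : Int) < row) :
    ((sepLoopBody row)^[n] (if (((r ++ [x]).length : Int) = row)
        then (d', ([] : List String), res ++ [r ++ [x]]) else (d', r ++ [x], res))).2.2
      = res ++ chunkRows row ((r ++ [x]) ++ List.replicate a.toNat "O" ++ List.replicate b.toNat "A"
          ++ List.replicate w.toNat "W" ++ List.replicate h.toNat "H") [] := by
  have h0row : 0 < row := by
    have : (0:Int) ≤ (r.length : Int) := Int.natCast_nonneg _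
    omega
  have hlen : (((r ++ [x]).length : Int)) = (r.length : Int) + 1 := by
    simp
  by_cases hfull : (((r ++ [x]).length : Int) = row)
  · rw [if_pos hfull]
    rw [ih d' a b w h [] (res ++ [r ++ [x]]) hO hA hW hH ha hb hw hh hsum (by simpa using h0row)]
    have hseq : (r ++ [x]) ++ List.replicate a.toNat "O" ++ List.replicate b.toNat "A"
        ++ List.replicate w.toNat "W" ++ List.replicate h.toNat "H"
      = (r ++ [x]) ++ (List.replicate a.toNat "O" ++ List.replicate b.toNat "A"
        ++ List.replicate w.toNat "W" ++ List.replicate h.toNat "H") := by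
      simp [List.append_assoc]
    rw [hseq, chunk_full row (r ++ [x]) _ hfull h0row]
    simp
  · rw [if_neg hfull]
    rw [hlen] at hfull
    exact ih d' a b w h (r ++ [x]) res hO hA hW hH ha hb hw hh hsum (by rw [hlen]; omega)

theorem loopA (row : Int) : ∀ (n : Nat) (d : PySem.Dict String Int) (a b w h : Int)
    (r : List String) (res : List (List String)),
    d.getD "O" 0 = a → d.getD "A" 0 = b → d.getD "W" 0 = w → d.getD "H" 0 = h →
    0 ≤ a → 0 ≤ b → 0 ≤ w → 0 ≤ h → a + b + w + h = n → (r.length : Int) < row →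
    ((sepLoopBody row)^[n] (d, r, res)).2.2
      = res ++ chunkRows row (r ++ List.replicate a.toNat "O" ++ List.replicate b.toNat "A"
          ++ List.replicate w.toNat "W" ++ List.replicate h.toNat "H") [] := by
  intro n
  induction n with
  | zero =>
    intro d a b w h r res hO hA hW hH ha hb hw hh hsum hr
    obtain ⟨rfl, rfl, rfl, rfl⟩ : a = 0 ∧ b = 0 ∧ w = 0 ∧ h = 0 := by
      refine ⟨by omega, by omega, by omega, by omega⟩
    simp only [Function.iterate_zero, id_eq, Int.toNat_zero, List.replicate_zero,
      List.append_nil]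
    rw [chunk_nil_short row r hr]
    simp
  | succ n ih =>
    intro d a b w h r res hO hA hW hH ha hb hw hh hsum hr
    rw [Function.iterate_succ_apply]
    by_cases ha0 : a = 0
    · by_cases hb0 : b = 0
      · by_cases hw0 : w = 0
        · -- H branch
          subst ha0 hb0 hw0
          have hstep : sepLoopBody row (d, r, res)
              = (if (((r ++ ["H"]).length : Int) = row)
                  then (PySem.Dict.modify d "H" 0 (· - 1), ([] : List String), res ++ [r ++ ["H"]])
                  else (PySem.Dict.modify d "H" 0 (· - 1), r ++ ["H"], res)) := by
            simp only [sepLoopBody, hO, hA, hW]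
            simp
          rw [hstep]
          have hH' : (PySem.Dict.modify d "H" 0 (· - 1)).getD "H" 0 = h - 1 := by
            simp [hH]
          have hO' : (PySem.Dict.modify d "H" 0 (· - 1)).getD "O" 0 = 0 := by
            simp [PySem.Dict.getD_modify, hO]
          have hA' : (PySem.Dict.modify d "H" 0 (· - 1)).getD "A" 0 = 0 := by
            simp [PySem.Dict.getD_modify, hA]
          have hW' : (PySem.Dict.modify d "H" 0 (· - 1)).getD "W" 0 = 0 := by
            simp [PySem.Dict.getD_modify, hW]
          rw [step_chunk row n ih _ 0 0 0 (h - 1) hO' hA' hW' hH'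
            le_rfl le_rfl le_rfl (by omega) (by omega) r res "H" hr]
          have ht : h.toNat = (h - 1).toNat + 1 := by omega
          rw [ht, List.replicate_succ]
          simp [List.append_assoc]
        · -- W branch
          subst ha0 hb0
          have hstep : sepLoopBody row (d, r, res)
              = (if (((r ++ ["W"]).length : Int) = row)
                  then (PySem.Dict.modify d "W" 0 (· - 1), ([] : List String), res ++ [r ++ ["W"]])
                  else (PySem.Dict.modify d "W" 0 (· - 1), r ++ ["W"], res)) := by
            simp only [sepLoopBody, hO, hA, hW]
            simp [hw0]
          rw [hstep]
          have hW' : (PySem.Dict.modify d "W" 0 (· - 1)).getD "W" 0 = w - 1 := by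
            simp [hW]
          have hO' : (PySem.Dict.modify d "W" 0 (· - 1)).getD "O" 0 = 0 := by
            simp [PySem.Dict.getD_modify, hO]
          have hA' : (PySem.Dict.modify d "W" 0 (· - 1)).getD "A" 0 = 0 := by
            simp [PySem.Dict.getD_modify, hA]
          have hH' : (PySem.Dict.modify d "W" 0 (· - 1)).getD "H" 0 = h := by
            simp [PySem.Dict.getD_modify, hH]
          rw [step_chunk row n ih _ 0 0 (w - 1) h hO' hA' hW' hH'
            le_rfl le_rfl (by omega) hh (by omega) r res "W" hr]
          have ht : w.toNat = (w - 1).toNat + 1 := by omega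
          rw [ht, List.replicate_succ]
          simp [List.append_assoc]
      · -- A branch
        subst ha0
        have hstep : sepLoopBody row (d, r, res)
            = (if (((r ++ ["A"]).length : Int) = row)
                then (PySem.Dict.modify d "A" 0 (· - 1), ([] : List String), res ++ [r ++ ["A"]])
                else (PySem.Dict.modify d "A" 0 (· - 1), r ++ ["A"], res)) := by
          simp only [sepLoopBody, hO, hA, hW]
          simp [hb0]
        rw [hstep]
        have hA' : (PySem.Dict.modify d "A" 0 (· - 1)).getD "A" 0 = b - 1 := by
          simp [hA]
        have hO' : (PySem.Dict.modify d "A" 0 (· - 1)).getD "O" 0 = 0 := by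
          simp [PySem.Dict.getD_modify, hO]
        have hW' : (PySem.Dict.modify d "A" 0 (· - 1)).getD "W" 0 = w := by
          simp [PySem.Dict.getD_modify, hW]
        have hH' : (PySem.Dict.modify d "A" 0 (· - 1)).getD "H" 0 = h := by
          simp [PySem.Dict.getD_modify, hH]
        rw [step_chunk row n ih _ 0 (b - 1) w h hO' hA' hW' hH'
          le_rfl (by omega) hw hh (by omega) r res "A" hr]
        have ht : b.toNat = (b - 1).toNat + 1 := by omega
        rw [ht, List.replicate_succ]
        simp [List.append_assoc]
    · -- O branch
      have hstep : sepLoopBody row (d, r, res)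
          = (if (((r ++ ["O"]).length : Int) = row)
              then (PySem.Dict.modify d "O" 0 (· - 1), ([] : List String), res ++ [r ++ ["O"]])
              else (PySem.Dict.modify d "O" 0 (· - 1), r ++ ["O"], res)) := by
        simp only [sepLoopBody, hO, hA, hW]
        simp [ha0]
      rw [hstep]
      have hO' : (PySem.Dict.modify d "O" 0 (· - 1)).getD "O" 0 = a - 1 := by
        simp [hO]
      have hA' : (PySem.Dict.modify d "O" 0 (· - 1)).getD "A" 0 = b := by
        simp [PySem.Dict.getD_modify, hA]
      have hW' : (PySem.Dict.modify d "O" 0 (· - 1)).getD "W" 0 = w := by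
        simp [PySem.Dict.getD_modify, hW]
      have hH' : (PySem.Dict.modify d "O" 0 (· - 1)).getD "H" 0 = h := by
        simp [PySem.Dict.getD_modify, hH]
      rw [step_chunk row n ih _ (a - 1) b w h hO' hA' hW' hH'
        (by omega) hb hw hh (by omega) r res "O" hr]
      have ht : a.toNat = (a - 1).toNat + 1 := by omega
      rw [ht, List.replicate_succ]
      simp [List.append_assoc]

-- ===== VERDICT (by name: the statement is the Claim_ definition above) =====
theorem separate_liquids_spec : Claim_equal_separate_liquids := by
  intro glass _ hpre
  unfold Spec_separate_liquids
  obtain ⟨hkeys, hrect⟩ := hpre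
  by_cases hg : glass = []
  · subst hg; rfl
  simp only [separate_liquids, separate_liquids_alt, if_neg hg]
  rw [foldl_ignore_index]
  rw [← Nat.cast_mul, PySem.List.pyRange_zero_natCast]
  simp only [List.length_map, List.length_range]
  by_cases hr0 : (glass.headD []).length = 0
  · rw [if_pos (show ((glass.headD []).length : Int) = 0 from by exact_mod_cast hr0)]
    rw [hr0, Nat.zero_mul]
    simp only [Function.iterate_zero, id_eq]
  · rw [if_neg (show ¬(((glass.headD []).length : Int) = 0) by exact_mod_cast hr0)]
    have hcnt : ∀ (v : String),
        (PySem.Dict.ofList [("O",(0:Int)),("A",0),("W",0),("H",0)]).getD v 0 = 0 →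
        ((glass.foldl (fun d l => l.foldl (fun d m => PySem.Dict.modify d m 0 (· + 1)) d)
          (PySem.Dict.ofList [("O",(0:Int)),("A",0),("W",0),("H",0)])).getD v 0)
          = ((glass.flatten.count v : Nat) : Int) := by
      intro v h0
      rw [← List.foldl_flatten, PySem.Dict.getD_foldl_modify_add_one, h0, zero_add]
    have hO := hcnt "O" (by rfl)
    have hA := hcnt "A" (by rfl)
    have hW := hcnt "W" (by rfl)
    have hH := hcnt "H" (by rfl)
    have hall : ∀ m ∈ glass.flatten, m = "O" ∨ m = "A" ∨ m = "W" ∨ m = "H" := by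
      intro m hm
      rcases List.mem_flatten.1 hm with ⟨l, hl, hm'⟩
      exact hkeys l hl m hm'
    have hcp := count_partition glass.flatten hall
    have hfl : glass.flatten.length = glass.length * (glass.headD []).length :=
      flatten_len glass _ hrect
    rw [loopA ((glass.headD []).length : Int) ((glass.headD []).length * glass.length)
      _ _ _ _ _ [] [] hO hA hW hH (Int.natCast_nonneg _) (Int.natCast_nonneg _)
      (Int.natCast_nonneg _) (Int.natCast_nonneg _)
      (by push_cast; rw [Nat.mul_comm] at hfl; omega)
      (by simpa using Nat.pos_of_ne_zero hr0)]
    simp only [PySem.List.pyRepeat_singleton, hO, hA, hW, hH]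
    simp
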